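-- pv_equiv track=rewrite | github.com/Liamdev631/copus-nn | hyperparam_optimizer.py | generate_hidden_configs
-- ===== SOURCE A (Python) =====
-- from typing import Dict, List, Tuple, Any
--
-- def generate_hidden_configs(search_dims: List[int], max_layers: int) -> List[List[int]]:
--     """
--     Generate all possible hidden layer configurations.
--
--     Args:
--         search_dims: List of dimensions to test
--         max_layers: Maximum number of layers
--
--     Returns:
--         List of configurations, each is a list of hidden dimensions
--     """
--     configs = []
--
--     # Single layer configurations
--     for dim in search_dims:
--         configs.append([dim])
--
--     # Two layer configurations
--     for dim1 in search_dims: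
--         for dim2 in search_dims:
--             if dim2 <= dim1:  # Decreasing dimensions
--                 configs.append([dim1, dim2])
--
--     # Three layer configurations
--     if max_layers >= 3:
--         for dim1 in search_dims:
--             for dim2 in search_dims:
--                 for dim3 in search_dims:
--                     if dim3 <= dim2 <= dim1:  # Decreasing dimensions
--                         configs.append([dim1, dim2, dim3])
--
--     return configs
-- ===== SOURCE B (Python) =====
-- def generate_hidden_configs(search_dims, max_layers):
--     """Recursive bounded generator: gen(k, bound) yields all non-increasing
--     k-length configs whose first dimension respects the bound, built by
--     consing a head onto recursively generated tails."""
--     def gen(k, bound=None):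
--         if k == 0:
--             return [[]]
--         return [[d] + rest
--                 for d in search_dims
--                 if bound is None or d <= bound
--                 for rest in gen(k - 1, d)]
--     configs = gen(1) + gen(2)
--     if max_layers >= 3:
--         configs = configs + gen(3)
--     return configs
-- ===== Notes on version B (the rewrite author's own statement) =====
-- stated objective: alternative
-- what changed: B replaces A's three independent nested-loop blocks with one recursive bounded generator gen(k, bound) that builds non-increasing sequences front-to-back by consing a head onto recursively generated tails, concatenating gen(1), gen(2) and (if max_layers >= 3) gen(3).
import Mathlib
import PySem

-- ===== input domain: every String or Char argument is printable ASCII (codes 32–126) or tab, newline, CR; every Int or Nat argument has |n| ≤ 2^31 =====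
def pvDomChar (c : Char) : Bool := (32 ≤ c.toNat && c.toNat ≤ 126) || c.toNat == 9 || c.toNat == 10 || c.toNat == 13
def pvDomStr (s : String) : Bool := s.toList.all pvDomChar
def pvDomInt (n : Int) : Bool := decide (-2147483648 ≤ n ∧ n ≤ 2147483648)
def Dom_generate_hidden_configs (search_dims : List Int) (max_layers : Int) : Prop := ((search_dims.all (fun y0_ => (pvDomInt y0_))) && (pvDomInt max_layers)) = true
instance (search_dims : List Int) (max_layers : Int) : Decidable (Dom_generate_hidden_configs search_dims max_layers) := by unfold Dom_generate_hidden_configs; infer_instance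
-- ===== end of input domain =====

-- B replaces A's independent nested loops by one recursive bounded generator building configs front-to-back by cons; objective: alternative, same asymptotic cost.


-- ===== PORT A =====
def generate_hidden_configs (search_dims : List Int) (max_layers : Int) : List (List Int) :=
  -- configs = []
  -- single layer configurations
  let configs : List (List Int) := search_dims.foldl (fun configs dim => configs ++ [[dim]]) []
  -- two layer configurations
  let configs := search_dims.foldl (fun configs dim1 =>
    search_dims.foldl (fun configs dim2 =>
      if dim2 ≤ dim1 then configs ++ [[dim1, dim2]] else configs) configs) configs
  -- three layer configurations
  if max_layers ≥ 3 then
    search_dims.foldl (fun configs dim1 =>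
      search_dims.foldl (fun configs dim2 =>
        search_dims.foldl (fun configs dim3 =>
          if dim3 ≤ dim2 ∧ dim2 ≤ dim1 then configs ++ [[dim1, dim2, dim3]] else configs)
          configs) configs) configs
  else configs

-- ===== PORT B =====
-- gen(k, bound): the list comprehension [[d] + rest for d in search_dims
--   if bound is None or d <= bound for rest in gen(k-1, d)]
def pvGen (search_dims : List Int) (k : Nat) (bound : Option Int) : List (List Int) :=
  match k with
  | 0 => [[]]
  | Nat.succ k' =>
    search_dims.flatMap (fun d =>
      if (match bound with | none => true | some b => decide (d ≤ b)) = true then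
        (pvGen search_dims k' (some d)).map (fun rest => d :: rest)
      else [])

def generate_hidden_configs_alt (search_dims : List Int) (max_layers : Int) : List (List Int) :=
  let configs := pvGen search_dims 1 none ++ pvGen search_dims 2 none
  if max_layers ≥ 3 then configs ++ pvGen search_dims 3 none else configs

-- ===== PRECONDITION & SPEC =====
def Spec_generate_hidden_configs (search_dims : List Int) (max_layers : Int) (out : List (List Int)) : Prop := out = generate_hidden_configs_alt search_dims max_layers
instance (search_dims : List Int) (max_layers : Int) (out : List (List Int)) : Decidable (Spec_generate_hidden_configs search_dims max_layers out) := by unfold Spec_generate_hidden_configs; infer_instance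

-- ===== CLAIM (what is proved, stated in full; the proofs are below) =====
def Claim_equal_generate_hidden_configs : Prop := ∀ (search_dims : List Int) (max_layers : Int), Dom_generate_hidden_configs search_dims max_layers → Spec_generate_hidden_configs search_dims max_layers (generate_hidden_configs search_dims max_layers)

-- ===== LEMMAS AND PROOFS =====

-- a flatMap of an if over singletons is a filtered map
theorem pv_flatMap_if {α β : Type} (l : List α) (p : α → Prop) [DecidablePred p] (g : α → List β) :
    l.flatMap (fun x => if p x then g x else []) = (l.filter (fun x => decide (p x))).flatMap g := by
  induction l with
  | nil => rfl
  | cons a t ih => by_cases h : p a <;> simp [h, ih]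

-- B's gen at depth 1 with a bound
theorem pvGen_one_some (dims : List Int) (b : Int) :
    pvGen dims 1 (some b) = (dims.filter (fun d => decide (d ≤ b))).map (fun d => [d]) := by
  have h : pvGen dims 1 (some b)
      = dims.flatMap (fun d => if d ≤ b then [[d]] else []) := by
    simp [pvGen]
  rw [h, pv_flatMap_if]
  exact (List.map_eq_flatMap).symm

-- B's gen at depth 1 unbounded
theorem pvGen_one_none (dims : List Int) :
    pvGen dims 1 none = dims.map (fun d => [d]) := by
  simp [pvGen, List.map_eq_flatMap]

-- B's gen at depth 2 unbounded
theorem pvGen_two_none (dims : List Int) :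
    pvGen dims 2 none
      = dims.flatMap (fun d1 =>
          (dims.filter (fun d2 => decide (d2 ≤ d1))).map (fun d2 => [d1, d2])) := by
  have h : pvGen dims 2 none
      = dims.flatMap (fun d1 => (pvGen dims 1 (some d1)).map (fun rest => d1 :: rest)) := by
    simp [pvGen]
  rw [h]
  apply congrArg (fun f => List.flatMap f dims)
  funext d1
  rw [pvGen_one_some, List.map_map]
  rfl

-- B's gen at depth 2 with a bound
theorem pvGen_two_some (dims : List Int) (b : Int) :
    pvGen dims 2 (some b)
      = dims.flatMap (fun d1 => if d1 ≤ b then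
          (dims.filter (fun d2 => decide (d2 ≤ d1))).map (fun d2 => [d1, d2]) else []) := by
  have h : pvGen dims 2 (some b)
      = dims.flatMap (fun d1 => if d1 ≤ b then
          (pvGen dims 1 (some d1)).map (fun rest => d1 :: rest) else []) := by
    simp [pvGen]
  rw [h]
  apply congrArg (fun f => List.flatMap f dims)
  funext d1
  by_cases hb : d1 ≤ b
  · rw [if_pos hb, if_pos hb, pvGen_one_some, List.map_map]; rfl
  · rw [if_neg hb, if_neg hb]

-- B's gen at depth 3 unbounded
theorem pvGen_three_none (dims : List Int) :
    pvGen dims 3 none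
      = dims.flatMap (fun d1 => dims.flatMap (fun d2 =>
          if d2 ≤ d1 then
            (dims.filter (fun d3 => decide (d3 ≤ d2))).map (fun d3 => [d1, d2, d3])
          else [])) := by
  have h : pvGen dims 3 none
      = dims.flatMap (fun d1 => (pvGen dims 2 (some d1)).map (fun rest => d1 :: rest)) := by
    simp [pvGen]
  rw [h]
  apply congrArg (fun f => List.flatMap f dims)
  funext d1
  rw [pvGen_two_some, List.map_flatMap]
  apply congrArg (fun f => List.flatMap f dims)
  funext d2
  by_cases hb : d2 ≤ d1
  · rw [if_pos hb, if_pos hb, List.map_map]; rfl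
  · rw [if_neg hb, if_neg hb]; rfl

-- A's inner two-layer loop as a filtered map
theorem pvA_inner2 (search_dims : List Int) (d1 : Int) (acc : List (List Int)) :
    search_dims.foldl (fun configs dim2 =>
        if dim2 ≤ d1 then configs ++ [[d1, dim2]] else configs) acc
      = acc ++ (search_dims.filter (fun d2 => decide (d2 ≤ d1))).map (fun d2 => [d1, d2]) := by
  have h := PySem.List.foldl_append_if (fun d2 => decide (d2 ≤ d1))
    (fun d2 => [d1, d2]) search_dims acc
  simpa using h

-- A's innermost three-layer loop as a filtered map
theorem pvA_inner3 (search_dims : List Int) (d1 d2 : Int) (acc : List (List Int)) :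
    search_dims.foldl (fun configs dim3 =>
        if dim3 ≤ d2 ∧ d2 ≤ d1 then configs ++ [[d1, d2, dim3]] else configs) acc
      = acc ++ (search_dims.filter (fun d3 => decide (d3 ≤ d2 ∧ d2 ≤ d1))).map
          (fun d3 => [d1, d2, d3]) := by
  have h := PySem.List.foldl_append_if (fun d3 => decide (d3 ≤ d2 ∧ d2 ≤ d1))
    (fun d3 => [d1, d2, d3]) search_dims acc
  simpa using h

-- A's two-layer block equals B's gen(2)
theorem pv_level2 (search_dims : List Int) (acc : List (List Int)) :
    search_dims.foldl (fun configs dim1 =>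
      search_dims.foldl (fun configs dim2 =>
        if dim2 ≤ dim1 then configs ++ [[dim1, dim2]] else configs) configs) acc
      = acc ++ pvGen search_dims 2 none := by
  simp only [pvA_inner2]
  rw [PySem.List.foldl_append_eq_flatMap, pvGen_two_none]

-- A's three-layer block equals B's gen(3)
theorem pv_level3 (search_dims : List Int) (acc : List (List Int)) :
    search_dims.foldl (fun configs dim1 =>
      search_dims.foldl (fun configs dim2 =>
        search_dims.foldl (fun configs dim3 =>
          if dim3 ≤ dim2 ∧ dim2 ≤ dim1 then configs ++ [[dim1, dim2, dim3]] else configs)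
          configs) configs) acc
      = acc ++ pvGen search_dims 3 none := by
  simp only [pvA_inner3]
  have h2 : ∀ (acc : List (List Int)) (d1 : Int),
      search_dims.foldl (fun configs d2 => configs ++
        (search_dims.filter (fun d3 => decide (d3 ≤ d2 ∧ d2 ≤ d1))).map
          (fun d3 => [d1, d2, d3])) acc
      = acc ++ search_dims.flatMap (fun d2 =>
          (search_dims.filter (fun d3 => decide (d3 ≤ d2 ∧ d2 ≤ d1))).map
            (fun d3 => [d1, d2, d3])) :=
    fun acc d1 => PySem.List.foldl_append_eq_flatMap _ _ _
  simp only [h2]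
  rw [PySem.List.foldl_append_eq_flatMap, pvGen_three_none]
  congr 1
  apply congrArg (fun f => List.flatMap f search_dims)
  funext d1
  apply congrArg (fun f => List.flatMap f search_dims)
  funext d2
  by_cases hb : d2 ≤ d1
  · rw [if_pos hb]
    apply congrArg
    apply congrArg (fun l => List.filter l search_dims)
    funext d3
    simp [hb]
  · rw [if_neg hb]
    simp [hb]

-- ===== VERDICT (by name: the statement is the Claim_ definition above) =====
theorem generate_hidden_configs_spec : Claim_equal_generate_hidden_configs := by
  intro search_dims max_layers _
  unfold Spec_generate_hidden_configs generate_hidden_configs generate_hidden_configs_alt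
  simp only [PySem.List.foldl_append_singleton_eq_map, List.nil_append]
  rw [pv_level2, ← pvGen_one_none]
  by_cases h : max_layers ≥ 3
  · rw [if_pos h, if_pos h, pv_level3]
  · simp [h]
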